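-- pv_equiv track=rewrite | github.com/Rechidesigns/DSA | Python DSA/TestGorilatestkit/test.py | firstLastIndex
-- ===== SOURCE A (Python) =====
-- def firstLastIndex(nums):
--     pos = {}
--     for i, num in enumerate(nums):
--         if num not in pos:
--             pos[num] = [i, i]
--         else:
--             pos[num][1] = i
--     return pos
-- ===== SOURCE B (Python) =====
-- def firstLastIndex(nums):
--     # pass 1: last occurrence of each value (later indices overwrite)
--     last = {num: i for i, num in enumerate(nums)}
--     # pass 2: first occurrence of each value
--     first = {}
--     for i, num in enumerate(nums):
--         if num not in first:
--             first[num] = i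
--     # merge, iterating in first-appearance key order
--     return {num: [f, last[num]] for num, f in first.items()}
-- ===== Notes on version B (the rewrite author's own statement) =====
-- stated objective: alternative
-- what changed: Replaces A's single fused branchy pass that mutates per-key [first,last] lists with two independent aggregations (a last-occurrence dict comprehension and a first-occurrence pass) merged afterwards in first-appearance key order.
import Mathlib
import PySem

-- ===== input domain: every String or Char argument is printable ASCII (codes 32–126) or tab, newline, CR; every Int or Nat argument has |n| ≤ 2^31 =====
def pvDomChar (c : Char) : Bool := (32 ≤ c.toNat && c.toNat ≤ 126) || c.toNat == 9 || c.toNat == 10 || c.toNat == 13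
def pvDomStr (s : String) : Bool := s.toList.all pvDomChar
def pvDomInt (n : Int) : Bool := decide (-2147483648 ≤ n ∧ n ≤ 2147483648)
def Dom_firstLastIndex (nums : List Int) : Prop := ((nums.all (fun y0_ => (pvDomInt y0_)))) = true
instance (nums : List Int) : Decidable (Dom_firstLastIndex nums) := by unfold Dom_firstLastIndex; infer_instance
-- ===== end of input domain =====

-- B replaces A's single fused pass (mutating per-key [first,last] lists) with two
-- independent aggregation passes (last- and first-occurrence dicts) merged afterwards;
-- objective: alternative decomposition, same O(n) cost.

-- ===== PORT A =====
-- one pass: pos[num] = [i,i] on first sight, else pos[num][1] = i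
def pvStepA (pos : PySem.Dict Int (List Int)) (p : Int × Int) : PySem.Dict Int (List Int) :=
  if pos.contains p.2 = false then pos.insert p.2 [p.1, p.1]
  else pos.modify p.2 [] (fun l => PySem.List.pySetD l 1 p.1)

def firstLastIndex (nums : List Int) : List (Int × List Int) :=
  ((PySem.List.enumerate nums 0).foldl pvStepA PySem.Dict.empty).items

-- ===== PORT B =====
def pvStepL (d : PySem.Dict Int Int) (p : Int × Int) : PySem.Dict Int Int :=
  d.insert p.2 p.1

def pvStepF (d : PySem.Dict Int Int) (p : Int × Int) : PySem.Dict Int Int :=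
  if d.contains p.2 = false then d.insert p.2 p.1 else d

-- last[num] is present whenever num is a key of first, so getD's default 0 is never used
def firstLastIndex_alt (nums : List Int) : List (Int × List Int) :=
  let last := (PySem.List.enumerate nums 0).foldl pvStepL PySem.Dict.empty
  let first := (PySem.List.enumerate nums 0).foldl pvStepF PySem.Dict.empty
  (first.items.foldl
    (fun r (p : Int × Int) => r.insert p.1 [p.2, last.getD p.1 0])
    PySem.Dict.empty).items

-- ===== PRECONDITION & SPEC =====
def Spec_firstLastIndex (nums : List Int) (out : List (Int × List Int)) : Prop := out = firstLastIndex_alt nums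
instance (nums : List Int) (out : List (Int × List Int)) : Decidable (Spec_firstLastIndex nums out) := by unfold Spec_firstLastIndex; infer_instance

-- ===== CLAIM (what is proved, stated in full; the proofs are below) =====
def Claim_equal_firstLastIndex : Prop := ∀ (nums : List Int), Dom_firstLastIndex nums → Spec_firstLastIndex nums (firstLastIndex nums)

-- ===== LEMMAS AND PROOFS =====

-- the merge B performs, expressed directly on the two dicts
def pvCombine (fD lD : PySem.Dict Int Int) : List (Int × List Int) :=
  fD.items.map (fun p => (p.1, [p.2, lD.getD p.1 0]))

lemma pvMain : ∀ (l : List Int) (s : Int) (dA : PySem.Dict Int (List Int))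
    (fD lD : PySem.Dict Int Int),
    fD.keys.Nodup →
    dA.items = pvCombine fD lD →
    ((PySem.List.enumerate l s).foldl pvStepA dA).items
      = pvCombine ((PySem.List.enumerate l s).foldl pvStepF fD)
                  ((PySem.List.enumerate l s).foldl pvStepL lD) := by
  intro l
  induction l with
  | nil =>
    intro s dA fD lD _ hItems
    simpa [PySem.List.enumerate_nil] using hItems
  | cons x xs ih =>
    intro s dA fD lD hnd hItems
    rw [PySem.List.enumerate_cons]
    simp only [List.foldl_cons]
    have hkeys : dA.keys = fD.keys := by
      simp only [PySem.Dict.keys, hItems, pvCombine, List.map_map]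
      rfl
    have hc : dA.contains x = fD.contains x := by
      rw [PySem.Dict.contains_eq_decide_mem_keys, PySem.Dict.contains_eq_decide_mem_keys, hkeys]
    by_cases hfc : fD.contains x = true
    · -- repeated value: A rewrites the slot's last index, B updates the last-dict
      have hAc : dA.contains x = true := hc.trans hfc
      -- the first index recorded for x
      obtain ⟨f0, hf0⟩ : ∃ v, (x, v) ∈ fD.items := by
        have hx : x ∈ fD.keys := (PySem.Dict.contains_iff_mem_keys fD x).mp hfc
        simp only [PySem.Dict.keys, List.mem_map] at hx
        obtain ⟨p, hp, hpe⟩ := hx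
        exact ⟨p.2, by simpa [← hpe] using hp⟩
      have hndA : dA.keys.Nodup := by rw [hkeys]; exact hnd
      have hget : dA.getD x [] = [f0, lD.getD x 0] := by
        apply PySem.Dict.getD_of_mem_items _ _ hndA
        rw [hItems]
        exact List.mem_map.mpr ⟨(x, f0), hf0, rfl⟩
      have hstepA : pvStepA dA (s, x) = dA.insert x [f0, s] := by
        have hset : PySem.List.pySetD [f0, lD.getD x 0] (1 : Int) s = [f0, s] := rfl
        simp [pvStepA, PySem.Dict.modify, hAc, hget, hset]
      have hstepF : pvStepF fD (s, x) = fD := by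
        simp [pvStepF, hfc]
      rw [hstepA, hstepF]
      apply ih
      · exact hnd
      · rw [PySem.Dict.items_insert_of_contains _ _ hAc, hItems]
        simp only [pvCombine, pvStepL, List.map_map]
        apply List.map_congr_left
        intro p hp
        by_cases hpx : p.1 = x
        · have hp2 : p.2 = f0 := by
            have h1 : fD.get? x = some p.2 :=
              (PySem.Dict.get?_eq_some_iff_mem_items fD x p.2 hnd).mpr (by rw [← hpx]; exact hp)
            have h2 : fD.get? x = some f0 :=
              (PySem.Dict.get?_eq_some_iff_mem_items fD x f0 hnd).mpr hf0
            exact Option.some.inj (h1.symm.trans h2)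
          simp [Function.comp, hpx, hp2]
        · simp [Function.comp, hpx, PySem.Dict.getD_insert]
    · -- fresh value: both sides append a new entry
      have hfc' : fD.contains x = false := by simpa using hfc
      have hAc : dA.contains x = false := hc.trans hfc'
      have hstepA : pvStepA dA (s, x) = dA.insert x [s, s] := by
        simp [pvStepA, hAc]
      have hstepF : pvStepF fD (s, x) = fD.insert x s := by
        simp [pvStepF, hfc']
      rw [hstepA, hstepF]
      apply ih
      · exact PySem.Dict.nodup_keys_insert _ _ _ hnd
      · rw [PySem.Dict.items_insert_of_not_contains _ _ hAc, hItems]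
        simp only [pvCombine, pvStepL]
        rw [PySem.Dict.items_insert_of_not_contains _ _ hfc', List.map_append]
        congr 1
        · apply List.map_congr_left
          intro p hp
          have hpx : p.1 ≠ x := by
            intro he
            apply hfc
            apply (PySem.Dict.contains_iff_mem_keys fD x).mpr
            rw [← he]
            exact PySem.Dict.mem_keys_of_mem_items _ hp
          rw [PySem.Dict.getD_insert]
          simp [hpx]
        · simp [PySem.Dict.getD_insert]

lemma pvNodupF : ∀ (l : List Int) (s : Int) (fD : PySem.Dict Int Int),
    fD.keys.Nodup → ((PySem.List.enumerate l s).foldl pvStepF fD).keys.Nodup := by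
  intro l
  induction l with
  | nil => intro s fD h; simpa [PySem.List.enumerate_nil] using h
  | cons x xs ih =>
    intro s fD h
    rw [PySem.List.enumerate_cons]
    simp only [List.foldl_cons]
    apply ih
    unfold pvStepF
    split
    · exact PySem.Dict.nodup_keys_insert _ _ _ h
    · exact h

-- B's final fold over first.items just realises pvCombine
lemma pvAssemble (fD lD : PySem.Dict Int Int) (h : fD.keys.Nodup) :
    (fD.items.foldl
      (fun r (p : Int × Int) => r.insert p.1 [p.2, lD.getD p.1 0])
      PySem.Dict.empty).items = pvCombine fD lD := by
  rw [PySem.Dict.items_foldl_insert_fresh fD.items (fun p => p.1)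
        (fun p => [p.2, lD.getD p.1 0]) PySem.Dict.empty
        (by intro a _; simp [PySem.Dict.contains_empty])
        (by simpa [PySem.Dict.keys] using h)]
  simp [pvCombine, PySem.Dict.empty]

-- ===== VERDICT (by name: the statement is the Claim_ definition above) =====
theorem firstLastIndex_spec : Claim_equal_firstLastIndex := by
  intro nums _
  unfold Spec_firstLastIndex firstLastIndex firstLastIndex_alt
  rw [pvAssemble _ _ (pvNodupF nums 0 _ (by simp [PySem.Dict.keys_empty]))]
  exact pvMain nums 0 _ _ _ (by simp [PySem.Dict.keys_empty]) (by simp [pvCombine, PySem.Dict.empty])
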